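-- pv_equiv track=rewrite | github.com/foreverxujiahuan/algorithm | 竞赛/A418/A.py | f
-- ===== SOURCE A (Python) =====
-- def f(nums):
--     bin_str = ""
--     for n in nums:
--         bin_n = bin(n)[2:]
--         bin_str += bin_n
--     flag = 1
--     ans = 0
--     for c in reversed(bin_str):
--         if c == '1':
--             ans += flag
--         flag *= 2
--     return ans
-- ===== SOURCE B (Python) =====
-- def f(nums):
--     # Horner pass: shift the running value by each element's bin-digit width and
--     # add its magnitude (A reads bin(n)[2:], which for n < 0 drops the sign and
--     # turns the leading 'b' into a zero bit, so each element contributes abs(n)).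
--     ans = 0
--     for n in nums:
--         ans = (ans << (len(bin(n)) - 2)) + abs(n)
--     return ans
-- ===== Notes on version B (the rewrite author's own statement) =====
-- stated objective: faster
-- what changed: Replaces the concatenated-binary-string construction plus a reversed per-character re-reading loop by one Horner-style pass that shifts a running integer by each element's bin-digit width (len(bin(n))-2) and adds its magnitude, which is exactly what A's string reading yields (A's bin(n)[2:] drops a negative sign and reads the leftover 'b' as a zero bit).
import Mathlib
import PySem

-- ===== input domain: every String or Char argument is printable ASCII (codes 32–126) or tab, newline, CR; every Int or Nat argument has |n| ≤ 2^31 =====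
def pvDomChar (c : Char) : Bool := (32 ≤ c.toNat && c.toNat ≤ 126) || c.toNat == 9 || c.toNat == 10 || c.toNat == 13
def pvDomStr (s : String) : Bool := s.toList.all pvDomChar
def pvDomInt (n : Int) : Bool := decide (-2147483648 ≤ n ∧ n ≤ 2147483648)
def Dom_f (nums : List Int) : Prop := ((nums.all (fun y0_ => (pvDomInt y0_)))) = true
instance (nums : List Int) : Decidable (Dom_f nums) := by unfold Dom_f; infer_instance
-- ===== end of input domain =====

-- B replaces A's build-a-binary-string-then-reread-it-in-reverse with one Horner pass on integers (simpler, no string):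
-- each element contributes abs(n) shifted by len(bin(n))-2, which is exactly what A's string reading yields.

-- ===== PORT A =====
-- bin(m)[2:] for m ≥ 1, MSB first (exact: Python's bin on positive ints)
def binAux : Nat → List Char
  | 0 => []
  | m + 1 => binAux ((m + 1) / 2) ++ [if (m + 1) % 2 = 1 then '1' else '0']
decreasing_by exact Nat.div_lt_self (Nat.succ_pos m) (by omega)

-- bin(m)[2:] for m ≥ 0 (bin(0)[2:] = "0")
def pyBinDigits (m : Nat) : List Char := if m = 0 then ['0'] else binAux m

-- first loop builds bin_str (a list of chars); bin(n)[2:] is 'b' ++ digits of |n| when n < 0;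
-- second loop walks reversed(bin_str) with state (ans, flag): ans += flag if c == '1'; flag *= 2
def f (nums : List Int) : Int :=
  ((nums.foldl
      (fun s n => s ++ (if n < 0 then 'b' :: pyBinDigits (-n).toNat else pyBinDigits n.toNat))
      []).reverse.foldl
    (fun (p : Int × Int) c => (if c = '1' then p.1 + p.2 else p.1, p.2 * 2)) (0, 1)).1

-- ===== PORT B =====
-- ans = (ans << (len(bin(n)) - 2)) + abs(n)
def f_alt (nums : List Int) : Int :=
  nums.foldl (fun ans n =>
    ans * 2 ^ (if n < 0 then (pyBinDigits (-n).toNat).length + 1 else (pyBinDigits n.toNat).length) + |n|) 0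

-- ===== PRECONDITION & SPEC =====
def Spec_f (nums : List Int) (out : Int) : Prop := out = f_alt nums
instance (nums : List Int) (out : Int) : Decidable (Spec_f nums out) := by unfold Spec_f; infer_instance

-- ===== CLAIM (what is proved, stated in full; the proofs are below) =====
def Claim_equal_f : Prop := ∀ (nums : List Int), Dom_f nums → Spec_f nums (f nums)

-- ===== LEMMAS AND PROOFS =====

-- MSB-first binary value of a char list ('1' ↦ 1, anything else ↦ 0)
def bval (s : List Char) : Int := s.foldl (fun a c => 2 * a + (if c = '1' then 1 else 0)) 0

theorem bval_horner (s : List Char) : ∀ (a : Int),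
    s.foldl (fun a c => 2 * a + (if c = '1' then 1 else 0)) a = a * 2 ^ s.length + bval s := by
  induction s with
  | nil => intro a; simp [bval]
  | cons c s ih =>
      intro a
      have h : bval (c :: s)
          = s.foldl (fun a c => 2 * a + (if c = '1' then 1 else 0))
              (2 * 0 + (if c = '1' then (1 : Int) else 0)) := rfl
      rw [List.foldl_cons, ih, List.length_cons, h, ih]
      ring

theorem bval_cons (c : Char) (s : List Char) :
    bval (c :: s) = (if c = '1' then (1 : Int) else 0) * 2 ^ s.length + bval s := by
  have h : bval (c :: s)
      = s.foldl (fun a c => 2 * a + (if c = '1' then 1 else 0))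
          (2 * 0 + (if c = '1' then (1 : Int) else 0)) := rfl
  rw [h, bval_horner]
  ring

theorem bval_append (s t : List Char) : bval (s ++ t) = bval s * 2 ^ t.length + bval t := by
  simp only [bval, List.foldl_append]
  exact bval_horner t (bval s)

theorem binAux_zero : binAux 0 = [] := by rw [binAux]

theorem bval_binAux : ∀ m : Nat, bval (binAux m) = (m : Int) := by
  intro m
  induction m using binAux.induct with
  | case1 => rw [binAux_zero]; simp [bval]
  | case2 m ih =>
      rw [binAux, bval_append, ih]
      by_cases h : (m + 1) % 2 = 1 <;> simp [h, bval] <;> omega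

theorem bval_pyBinDigits (m : Nat) : bval (pyBinDigits m) = (m : Int) := by
  unfold pyBinDigits
  split
  · simp [bval, *]
  · exact bval_binAux m

-- A's second loop, read through foldl_reverse
theorem revloop (s : List Char) : ∀ (ans flag : Int),
    s.reverse.foldl (fun (p : Int × Int) c => (if c = '1' then p.1 + p.2 else p.1, p.2 * 2)) (ans, flag)
      = (ans + flag * bval s, flag * 2 ^ s.length) := by
  induction s with
  | nil => intro ans flag; simp [bval]
  | cons c s ih =>
      intro ans flag
      rw [List.foldl_reverse, List.foldr_cons, ← List.foldl_reverse, ih, bval_cons, Prod.ext_iff]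
      refine ⟨?_, ?_⟩
      · dsimp only
        split_ifs with h <;> ring
      · dsimp only [List.length_cons]
        ring

-- the string A builds, valued, is B's Horner fold (a negative element's 'b' reads as a 0 bit)
theorem concat_eq_horner (nums : List Int) : ∀ (acc : List Char),
    bval (nums.foldl
      (fun s n => s ++ (if n < 0 then 'b' :: pyBinDigits (-n).toNat else pyBinDigits n.toNat)) acc)
    = nums.foldl (fun ans n =>
        ans * 2 ^ (if n < 0 then (pyBinDigits (-n).toNat).length + 1 else (pyBinDigits n.toNat).length) + |n|)
        (bval acc) := by
  induction nums with
  | nil => intro _; simp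
  | cons n nums ih =>
      intro acc
      simp only [List.foldl_cons]
      rw [ih]
      by_cases hn : n < 0
      · simp only [if_pos hn]
        rw [bval_append, bval_cons, bval_pyBinDigits, List.length_cons,
            Int.toNat_of_nonneg (by omega), abs_of_neg hn]
        norm_num [show ¬ ('b' : Char) = '1' from by decide]
      · simp only [if_neg hn]
        rw [bval_append, bval_pyBinDigits,
            Int.toNat_of_nonneg (by omega), abs_of_nonneg (by omega)]

-- ===== VERDICT (by name: the statement is the Claim_ definition above) =====
theorem f_spec : Claim_equal_f := by
  intro nums _
  show f nums = f_alt nums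
  unfold f f_alt
  rw [revloop]
  simpa [bval] using concat_eq_horner nums []
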